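-- pv_equiv track=rewrite | github.com/eliottcassidy2000/math | 04-computation/skeleton_n6_alpha2.py | canonical_full
-- ===== SOURCE A (Python) =====
-- from itertools import permutations, combinations
--
-- def canonical_full(A):
--     """Full canonical form (expensive). Only for small batches."""
--     n = len(A)
--     min_adj = None
--     for perm in permutations(range(n)):
--         adj = tuple(tuple(A[perm[i]][perm[j]] for j in range(n)) for i in range(n))
--         if min_adj is None or adj < min_adj:
--             min_adj = adj
--     return min_adj
-- ===== SOURCE B (Python) =====
-- def canonical_full(A):
--     """Full canonical form: branch-and-bound DFS over partial permutations instead of enumerating all of them."""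
--     n = len(A)
--
--     def full(perm):
--         return tuple(tuple(A[i][j] for j in perm) for i in perm)
--
--     def splits(rem):
--         if not rem:
--             return []
--         x, rest = rem[0], rem[1:]
--         return [([], x, rest)] + [([x] + p, y, r) for (p, y, r) in splits(rest)]
--
--     def dfs(perm, rem, best):
--         if not rem:
--             cand = full(perm)
--             return cand if cand < best else best
--         if perm:
--             p0 = perm[0]
--             pref = [A[p0][pj] for pj in perm]
--             if pref > list(best[0][:len(perm)]):
--                 return best  # every completion's first row already beats best: prune
--         for pre, x, rest in splits(rem):
--             best = dfs(perm + [x], pre + rest, best)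
--         return best
--
--     return dfs([], list(range(n)), full(list(range(n))))
-- ===== Notes on version B (the rewrite author's own statement) =====
-- stated objective: alternative
-- what changed: Replaces the exhaustive loop over all n! permutations with a recursive branch-and-bound search that assigns one index at a time and prunes any branch whose already-determined first-row prefix is strictly greater than the current best's first row.
import Mathlib
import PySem

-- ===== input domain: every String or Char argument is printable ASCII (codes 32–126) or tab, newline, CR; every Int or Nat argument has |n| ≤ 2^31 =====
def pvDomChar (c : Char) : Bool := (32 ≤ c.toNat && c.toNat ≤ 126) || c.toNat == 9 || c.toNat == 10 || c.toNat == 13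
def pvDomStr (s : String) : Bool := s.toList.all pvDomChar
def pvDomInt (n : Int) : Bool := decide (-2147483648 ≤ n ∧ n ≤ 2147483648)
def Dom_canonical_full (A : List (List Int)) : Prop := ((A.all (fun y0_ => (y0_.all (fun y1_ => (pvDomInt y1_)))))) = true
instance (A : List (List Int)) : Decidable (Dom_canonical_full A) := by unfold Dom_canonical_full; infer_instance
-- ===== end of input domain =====

-- B replaces A's exhaustive scan of all n! permutations by a recursive branch-and-bound
-- search that prunes a branch as soon as its (fully determined) first-row prefix is
-- already strictly greater than the current best's first row.

-- ===== PORT A =====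
-- A[i][j] for in-range indices (Pre_ guarantees every index used is in range,
-- where Python would raise IndexError the defaults below are never reached)
def pvRowGet (A : List (List Int)) (i j : Nat) : Int := (A.getD i []).getD j 0

-- Python's `<` on tuples of ints (lexicographic, shorter strict prefix is smaller)
def pvLexLt : List Int → List Int → Bool
  | [], [] => false
  | [], _ :: _ => true
  | _ :: _, [] => false
  | a :: as, b :: bs => if a < b then true else if b < a then false else pvLexLt as bs

-- Python's `<` on tuples of tuples of ints
def pvMatLt : List (List Int) → List (List Int) → Bool
  | [], [] => false
  | [], _ :: _ => true
  | _ :: _, [] => false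
  | a :: as, b :: bs => if pvLexLt a b then true else if pvLexLt b a then false else pvMatLt as bs

-- adj = tuple(tuple(A[perm[i]][perm[j]] for j in range(n)) for i in range(n))
def pvAdjA (A : List (List Int)) (n : Nat) (perm : List Nat) : List (List Int) :=
  (List.range n).map (fun i => (List.range n).map (fun j => pvRowGet A (perm.getD i 0) (perm.getD j 0)))

def canonical_full (A : List (List Int)) : List (List Int) :=
  let n := A.length
  ((PySem.List.permutations (List.range n) n).foldl
    (fun min_adj perm =>
      let adj := pvAdjA A n perm
      match min_adj with
      | none => some adj
      | some m => if pvMatLt adj m then some adj else some m)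
    none).getD []    -- the fold is over a nonempty list, so the default is never reached

-- ===== PORT B =====
-- full(perm) = tuple(tuple(A[i][j] for j in perm) for i in perm)
def pvFull (A : List (List Int)) (perm : List Nat) : List (List Int) :=
  perm.map (fun i => perm.map (fun j => pvRowGet A i j))

-- splits(rem): all (prefix, chosen, suffix) decompositions of rem
def pvSplits : List Nat → List (List Nat × Nat × List Nat)
  | [] => []
  | x :: rest => ([], x, rest) :: (pvSplits rest).map (fun z => (x :: z.1, z.2.1, z.2.2))

-- needed by pvDfs's termination proof
lemma pvSplits_eq_orig : ∀ (rem : List Nat) (z : List Nat × Nat × List Nat),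
    z ∈ pvSplits rem → z.1 ++ z.2.1 :: z.2.2 = rem := by
  intro rem
  induction rem with
  | nil => intro z hz; simp [pvSplits] at hz
  | cons x rest ih =>
    intro z hz
    simp only [pvSplits, List.mem_cons, List.mem_map] at hz
    rcases hz with rfl | ⟨w, hw, rfl⟩
    · rfl
    · simpa using congrArg (x :: ·) (ih w hw)

lemma pvSplits_len {rem : List Nat} {z : List Nat × Nat × List Nat}
    (h : z ∈ pvSplits rem) : z.1.length + z.2.2.length + 1 = rem.length := by
  have h1 := congrArg List.length (pvSplits_eq_orig rem z h)
  simp only [List.length_append, List.length_cons] at h1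
  omega

def pvDfs (A : List (List Int)) : List Nat → List Nat → List (List Int) → List (List Int)
  | perm, [], best =>
      let cand := pvFull A perm
      if pvMatLt cand best then cand else best
  | perm, y :: ys, best =>
      match perm with
      | [] =>
          (pvSplits (y :: ys)).attach.foldl
            (fun b z => pvDfs A (perm ++ [z.1.2.1]) (z.1.1 ++ z.1.2.2) b) best
      | p0 :: _ =>
          let pref := perm.map (fun pj => pvRowGet A p0 pj)
          if pvLexLt ((best.getD 0 []).take perm.length) pref then best
          else
            (pvSplits (y :: ys)).attach.foldl
              (fun b z => pvDfs A (perm ++ [z.1.2.1]) (z.1.1 ++ z.1.2.2) b) best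
termination_by _ rem _ => rem.length
decreasing_by
  all_goals
    have h := pvSplits_len z.2
    simp only [List.length_append, List.length_cons] at *
    omega

def canonical_full_alt (A : List (List Int)) : List (List Int) :=
  pvDfs A [] (List.range A.length) (pvFull A (List.range A.length))

-- ===== PRECONDITION & SPEC =====
-- Pre_ excludes exactly the inputs where Python A raises IndexError: a row shorter than
-- the number of rows (A[p][q] is read for all p, q < len(A)).
def Pre_canonical_full (A : List (List Int)) : Prop := ∀ r ∈ A, A.length ≤ r.length
instance (A : List (List Int)) : Decidable (Pre_canonical_full A) := by
  unfold Pre_canonical_full; infer_instance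
def pvWitness_canonical_full : List (List Int) := [[3, 1], [2, 0]]

def Spec_canonical_full (A : List (List Int)) (out : List (List Int)) : Prop := out = canonical_full_alt A
instance (A : List (List Int)) (out : List (List Int)) : Decidable (Spec_canonical_full A out) := by unfold Spec_canonical_full; infer_instance

-- ===== CLAIM (what is proved, stated in full; the proofs are below) =====
def Claim_equal_canonical_full : Prop := ∀ (A : List (List Int)), Dom_canonical_full A → Pre_canonical_full A → Spec_canonical_full A (canonical_full A)

-- ===== LEMMAS AND PROOFS =====

lemma pvLexLt_irrefl (a : List Int) : pvLexLt a a = false := by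
  induction a with
  | nil => rfl
  | cons x xs ih => simp [pvLexLt, ih]

lemma pvLexLt_cons_iff {a b : Int} {as bs : List Int} :
    pvLexLt (a :: as) (b :: bs) = true ↔ a < b ∨ (a = b ∧ pvLexLt as bs = true) := by
  simp only [pvLexLt]
  split_ifs with h1 h2
  · simp [h1]
  · simp only [false_iff]; omega
  · constructor
    · intro hh
      exact Or.inr ⟨by omega, hh⟩
    · rintro (h | ⟨h, hh⟩)
      · omega
      · exact hh

lemma pvLexLt_trans : ∀ {a b c : List Int},
    pvLexLt a b = true → pvLexLt b c = true → pvLexLt a c = true := by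
  intro a
  induction a with
  | nil =>
    intro b c hab hbc
    cases b with
    | nil => simp [pvLexLt] at hab
    | cons y ys =>
      cases c with
      | nil => simp [pvLexLt] at hbc
      | cons z zs => simp [pvLexLt]
  | cons x xs ih =>
    intro b c hab hbc
    cases b with
    | nil => simp [pvLexLt] at hab
    | cons y ys =>
      cases c with
      | nil => simp [pvLexLt] at hbc
      | cons z zs =>
        rw [pvLexLt_cons_iff] at hab hbc ⊢
        rcases hab with h | ⟨rfl, h⟩
        · rcases hbc with h' | ⟨rfl, h'⟩
          · exact Or.inl (by omega)
          · exact Or.inl h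
        · rcases hbc with h' | ⟨rfl, h'⟩
          · exact Or.inl h'
          · exact Or.inr ⟨rfl, ih h h'⟩

lemma pvLexLt_eq_of_not : ∀ {a b : List Int},
    pvLexLt a b = false → pvLexLt b a = false → a = b := by
  intro a
  induction a with
  | nil =>
    intro b hab _
    cases b with
    | nil => rfl
    | cons y ys => simp [pvLexLt] at hab
  | cons x xs ih =>
    intro b hab hba
    cases b with
    | nil => simp [pvLexLt] at hba
    | cons y ys =>
      rcases lt_trichotomy x y with h | h | h
      · have hT : pvLexLt (x :: xs) (y :: ys) = true := pvLexLt_cons_iff.mpr (Or.inl h)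
        simp [hab] at hT
      · subst h
        have h1 : pvLexLt xs ys = false := by
          cases h' : pvLexLt xs ys with
          | false => rfl
          | true =>
            have hT : pvLexLt (x :: xs) (x :: ys) = true := pvLexLt_cons_iff.mpr (Or.inr ⟨rfl, h'⟩)
            simp [hab] at hT
        have h2 : pvLexLt ys xs = false := by
          cases h' : pvLexLt ys xs with
          | false => rfl
          | true =>
            have hT : pvLexLt (x :: ys) (x :: xs) = true := pvLexLt_cons_iff.mpr (Or.inr ⟨rfl, h'⟩)
            simp [hba] at hT
        rw [ih h1 h2]
      · have hT : pvLexLt (y :: ys) (x :: xs) = true := pvLexLt_cons_iff.mpr (Or.inl h)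
        simp [hba] at hT

lemma pvMatLt_cons_iff {a b : List Int} {as bs : List (List Int)} :
    pvMatLt (a :: as) (b :: bs) = true ↔
      pvLexLt a b = true ∨ (pvLexLt a b = false ∧ pvLexLt b a = false ∧ pvMatLt as bs = true) := by
  simp only [pvMatLt]; split_ifs with h1 h2 <;> simp_all

lemma pvMatLt_irrefl (a : List (List Int)) : pvMatLt a a = false := by
  induction a with
  | nil => rfl
  | cons x xs ih => simp [pvMatLt, pvLexLt_irrefl, ih]

lemma pvMatLt_trans : ∀ {a b c : List (List Int)},
    pvMatLt a b = true → pvMatLt b c = true → pvMatLt a c = true := by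
  intro a
  induction a with
  | nil =>
    intro b c hab hbc
    cases b with
    | nil => simp [pvMatLt] at hab
    | cons y ys =>
      cases c with
      | nil => simp [pvMatLt] at hbc
      | cons z zs => simp [pvMatLt]
  | cons x xs ih =>
    intro b c hab hbc
    cases b with
    | nil => simp [pvMatLt] at hab
    | cons y ys =>
      cases c with
      | nil => simp [pvMatLt] at hbc
      | cons z zs =>
        rw [pvMatLt_cons_iff] at hab hbc ⊢
        rcases hab with h | ⟨h1, h2, h3⟩
        · rcases hbc with h' | ⟨h1', h2', h3'⟩
          · exact Or.inl (pvLexLt_trans h h')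
          · have : y = z := pvLexLt_eq_of_not h1' h2'
            exact Or.inl (this ▸ h)
        · rcases hbc with h' | ⟨h1', h2', h3'⟩
          · have : x = y := pvLexLt_eq_of_not h1 h2
            exact Or.inl (this ▸ h')
          · have hxy : x = y := pvLexLt_eq_of_not h1 h2
            subst hxy
            exact Or.inr ⟨h1', h2', ih h3 h3'⟩

lemma pvMatLt_eq_of_not : ∀ {a b : List (List Int)},
    pvMatLt a b = false → pvMatLt b a = false → a = b := by
  intro a
  induction a with
  | nil =>
    intro b hab _
    cases b with
    | nil => rfl
    | cons y ys => simp [pvMatLt] at hab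
  | cons x xs ih =>
    intro b hab hba
    cases b with
    | nil => simp [pvMatLt] at hba
    | cons y ys =>
      cases hxy : pvLexLt x y with
      | true =>
        have hT : pvMatLt (x :: xs) (y :: ys) = true := pvMatLt_cons_iff.mpr (Or.inl hxy)
        simp [hab] at hT
      | false =>
        cases hyx : pvLexLt y x with
        | true =>
          have hT : pvMatLt (y :: ys) (x :: xs) = true := pvMatLt_cons_iff.mpr (Or.inl hyx)
          simp [hba] at hT
        | false =>
          have hx : x = y := pvLexLt_eq_of_not hxy hyx
          subst hx
          have h1 : pvMatLt xs ys = false := by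
            cases h' : pvMatLt xs ys with
            | false => rfl
            | true =>
              have hT : pvMatLt (x :: xs) (x :: ys) = true := pvMatLt_cons_iff.mpr (Or.inr ⟨hxy, hyx, h'⟩)
              simp [hab] at hT
          have h2 : pvMatLt ys xs = false := by
            cases h' : pvMatLt ys xs with
            | false => rfl
            | true =>
              have hT : pvMatLt (x :: ys) (x :: xs) = true := pvMatLt_cons_iff.mpr (Or.inr ⟨hyx, hxy, h'⟩)
              simp [hba] at hT
          rw [ih h1 h2]

lemma pvMatLt_asymm {a b : List (List Int)} (h : pvMatLt a b = true) : pvMatLt b a = false := by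
  by_contra hc
  have hba : pvMatLt b a = true := by revert hc; cases pvMatLt b a <;> simp
  have := pvMatLt_trans h hba
  simp [pvMatLt_irrefl] at this

lemma pvMatLt_false_trans {x b r : List (List Int)}
    (h1 : pvMatLt x b = false) (h2 : pvMatLt b r = false) : pvMatLt x r = false := by
  by_contra hc
  have hxr : pvMatLt x r = true := by revert hc; cases pvMatLt x r <;> simp
  cases h : pvMatLt r b with
  | true => exact absurd (pvMatLt_trans hxr h) (by simp [h1])
  | false =>
    have : b = r := pvMatLt_eq_of_not h2 h
    subst this
    exact absurd hxr (by simp [h1])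

lemma pvLexLt_append : ∀ {a b : List Int}, a.length = b.length →
    pvLexLt a b = true → ∀ (u v : List Int), pvLexLt (a ++ u) (b ++ v) = true := by
  intro a
  induction a with
  | nil =>
    intro b hl hab
    cases b with
    | nil => simp [pvLexLt] at hab
    | cons y ys => simp at hl
  | cons x xs ih =>
    intro b hl hab u v
    cases b with
    | nil => simp at hl
    | cons y ys =>
      simp only [List.cons_append]
      rw [pvLexLt_cons_iff] at hab ⊢
      rcases hab with h | ⟨rfl, h⟩
      · exact Or.inl h
      · exact Or.inr ⟨rfl, ih (by simpa using hl) h u v⟩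


lemma pvMapRangeGetD {β : Type} (perm : List Nat) (f : Nat → β) :
    (List.range perm.length).map (fun i => f (perm.getD i 0)) = perm.map f := by
  apply List.ext_getElem
  · simp
  · intro i h1 h2
    have hi : i < perm.length := by simpa using h1
    simp [List.getElem_map, List.getElem_range, hi]

lemma pvAdjA_eq_pvFull (A : List (List Int)) (perm : List Nat) :
    pvAdjA A perm.length perm = pvFull A perm := by
  unfold pvAdjA pvFull
  rw [pvMapRangeGetD perm (fun i => (List.range perm.length).map fun j => pvRowGet A i (perm.getD j 0))]
  apply List.map_congr_left
  intro i _
  exact pvMapRangeGetD perm (fun j => pvRowGet A i j)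

lemma pvSplits_cover : ∀ (rem : List Nat) (x : Nat), x ∈ rem →
    ∃ z ∈ pvSplits rem, z.2.1 = x := by
  intro rem
  induction rem with
  | nil => intro x hx; simp at hx
  | cons y rest ih =>
    intro x hx
    rcases List.mem_cons.mp hx with rfl | hx
    · exact ⟨([], x, rest), by simp [pvSplits], rfl⟩
    · obtain ⟨z, hz, hzx⟩ := ih x hx
      refine ⟨(y :: z.1, z.2.1, z.2.2), ?_, hzx⟩
      simp only [pvSplits, List.mem_cons, List.mem_map]
      exact Or.inr ⟨z, hz, rfl⟩


lemma pvMemPerms : ∀ (p xs : List Nat), p.Perm xs → p ∈ PySem.List.permutations xs xs.length := by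
  intro p
  induction p with
  | nil =>
    intro xs h
    have : xs = [] := (List.nil_perm).mp h
    subst this
    rw [PySem.List.permutations.eq_def]
    simp
  | cons x p' ih =>
    intro xs h
    have hx : x ∈ xs := h.mem_iff.mp (List.mem_cons_self ..)
    obtain ⟨i, hi, hget⟩ := List.mem_iff_getElem.mp hx
    have hlen : xs.length = p'.length + 1 := by simpa using h.length_eq.symm
    have hxsdec : xs = xs.take i ++ x :: xs.drop (i + 1) := by
      conv_lhs => rw [← List.take_append_drop i xs]
      rw [← List.getElem_cons_drop hi, hget]
    have hperm2 : xs.Perm (x :: xs.eraseIdx i) := by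
      rw [List.eraseIdx_eq_take_drop_succ]
      conv_lhs => rw [hxsdec]
      exact List.perm_middle
    have hp' : p'.Perm (xs.eraseIdx i) := (h.trans hperm2).cons_inv
    have herlen : (xs.eraseIdx i).length = p'.length := by
      rw [List.length_eraseIdx_of_lt hi]; omega
    rw [hlen, PySem.List.permutations.eq_def]
    simp only [List.mem_flatMap, List.mem_range]
    refine ⟨i, by omega, ?_⟩
    have : xs[i]? = some x := by rw [List.getElem?_eq_getElem hi, hget]
    rw [this]
    simp only [List.mem_map]
    exact ⟨p', by rw [← herlen]; exact ih _ hp', rfl⟩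

lemma pvOptFold (f : List Nat → List (List Int)) :
    ∀ (l : List (List Nat)) (b : List (List Int)),
    l.foldl (fun min_adj perm =>
        let adj := f perm
        match min_adj with
        | none => some adj
        | some m => if pvMatLt adj m then some adj else some m) (some b)
      = some (l.foldl (fun m p => if pvMatLt (f p) m then f p else m) b) := by
  intro l
  induction l with
  | nil => intro b; rfl
  | cons p ps ih =>
    intro b
    simp only [List.foldl_cons]
    by_cases h : pvMatLt (f p) b = true
    · simp only [h, if_true]; exact ih (f p)
    · simp only [Bool.not_eq_true] at h
      simp only [h]; exact ih b

lemma pvFoldMin (f : List Nat → List (List Int)) :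
    ∀ (l : List (List Nat)) (b : List (List Int)),
    (l.foldl (fun m p => if pvMatLt (f p) m then f p else m) b = b ∨
      ∃ p ∈ l, l.foldl (fun m p => if pvMatLt (f p) m then f p else m) b = f p) ∧
    (∀ p ∈ l, pvMatLt (f p) (l.foldl (fun m p => if pvMatLt (f p) m then f p else m) b) = false) ∧
    pvMatLt b (l.foldl (fun m p => if pvMatLt (f p) m then f p else m) b) = false := by
  intro l
  induction l with
  | nil => intro b; exact ⟨Or.inl rfl, by simp, pvMatLt_irrefl b⟩
  | cons p ps ih =>
    intro b
    simp only [List.foldl_cons]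
    set b' := if pvMatLt (f p) b then f p else b with hb'
    obtain ⟨hmem, hmin, hb⟩ := ih b'
    have hfb : pvMatLt (f p) b' = false ∧ pvMatLt b b' = false := by
      by_cases h : pvMatLt (f p) b = true
      · simp only [hb', h, if_true]
        exact ⟨pvMatLt_irrefl _, pvMatLt_asymm h⟩
      · simp only [Bool.not_eq_true] at h
        rw [hb', if_neg (by simp [h])]
        exact ⟨h, pvMatLt_irrefl _⟩
    refine ⟨?_, ?_, pvMatLt_false_trans hfb.2 hb⟩
    · rcases hmem with h | ⟨q, hq, hqe⟩
      · rw [h, hb']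
        split_ifs with hc
        · exact Or.inr ⟨p, List.mem_cons_self .., rfl⟩
        · exact Or.inl rfl
      · exact Or.inr ⟨q, List.mem_cons_of_mem _ hq, hqe⟩
    · intro q hq
      rcases List.mem_cons.mp hq with rfl | hq
      · exact pvMatLt_false_trans hfb.1 hb
      · exact hmin q hq


-- the invariant of B's search: the result is the matLt-minimum of {best} ∪ {full(perm++s) | s ~ rem}
def pvGood (A : List (List Int)) (perm rem : List Nat) (best r : List (List Int)) : Prop :=
  (r = best ∨ ∃ s, s.Perm rem ∧ r = pvFull A (perm ++ s)) ∧
  (∀ s, s.Perm rem → pvMatLt (pvFull A (perm ++ s)) r = false) ∧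
  pvMatLt best r = false

lemma pvFold_good (A : List (List Int)) (perm rem : List Nat) :
    ∀ (ss : List (List Nat × Nat × List Nat)),
    (∀ z ∈ ss, z.1 ++ z.2.1 :: z.2.2 = rem) →
    (∀ z ∈ ss, ∀ (b : List (List Int)) (q : List Nat),
        q.length = perm.length + rem.length → b = pvFull A q →
        pvGood A (perm ++ [z.2.1]) (z.1 ++ z.2.2) b (pvDfs A (perm ++ [z.2.1]) (z.1 ++ z.2.2) b)) →
    ∀ (best : List (List Int)) (q : List Nat),
    q.length = perm.length + rem.length → best = pvFull A q →
    (ss.foldl (fun b z => pvDfs A (perm ++ [z.2.1]) (z.1 ++ z.2.2) b) best = best ∨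
      ∃ z ∈ ss, ∃ s, s.Perm (z.1 ++ z.2.2) ∧
        ss.foldl (fun b z => pvDfs A (perm ++ [z.2.1]) (z.1 ++ z.2.2) b) best
          = pvFull A ((perm ++ [z.2.1]) ++ s)) ∧
    (∀ z ∈ ss, ∀ s, s.Perm (z.1 ++ z.2.2) →
        pvMatLt (pvFull A ((perm ++ [z.2.1]) ++ s))
          (ss.foldl (fun b z => pvDfs A (perm ++ [z.2.1]) (z.1 ++ z.2.2) b) best) = false) ∧
    pvMatLt best (ss.foldl (fun b z => pvDfs A (perm ++ [z.2.1]) (z.1 ++ z.2.2) b) best) = false := by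
  intro ss
  induction ss with
  | nil =>
    intro _ _ best q _ _
    exact ⟨Or.inl rfl, by simp, pvMatLt_irrefl best⟩
  | cons z ss ih =>
    intro horig hrec best q hqlen hbest
    simp only [List.foldl_cons]
    set b1 := pvDfs A (perm ++ [z.2.1]) (z.1 ++ z.2.2) best with hb1
    have hzorig := horig z (List.mem_cons_self ..)
    have hgood : pvGood A (perm ++ [z.2.1]) (z.1 ++ z.2.2) best b1 :=
      hrec z (List.mem_cons_self ..) best q hqlen hbest
    obtain ⟨hgm, hgmin, hgb⟩ := hgood
    -- b1 is again the full matrix of some length-correct index list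
    have hq1 : ∃ q1 : List Nat, q1.length = perm.length + rem.length ∧ b1 = pvFull A q1 := by
      rcases hgm with h | ⟨s, hs, hse⟩
      · exact ⟨q, hqlen, h ▸ hbest⟩
      · refine ⟨(perm ++ [z.2.1]) ++ s, ?_, hse⟩
        have h1 : s.length = z.1.length + z.2.2.length := by simpa using hs.length_eq
        have h2 : z.1.length + z.2.2.length + 1 = rem.length := by
          have := congrArg List.length hzorig
          simp only [List.length_append, List.length_cons] at this
          omega
        simp only [List.length_append, List.length_cons, List.length_nil]
        omega
    obtain ⟨q1, hq1len, hq1e⟩ := hq1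
    obtain ⟨hm, hmin, hb⟩ := ih (fun w hw => horig w (List.mem_cons_of_mem _ hw))
      (fun w hw => hrec w (List.mem_cons_of_mem _ hw)) b1 q1 hq1len hq1e
    refine ⟨?_, ?_, pvMatLt_false_trans hgb hb⟩
    · rcases hm with h | ⟨w, hw, s, hs, hse⟩
      · rw [h]
        rcases hgm with h' | ⟨s, hs, hse⟩
        · exact Or.inl h'
        · exact Or.inr ⟨z, List.mem_cons_self .., s, hs, hse⟩
      · exact Or.inr ⟨w, List.mem_cons_of_mem _ hw, s, hs, hse⟩
    · intro w hw s hs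
      rcases List.mem_cons.mp hw with rfl | hw
      · exact pvMatLt_false_trans (hgmin s hs) hb
      · exact hmin w hw s hs


lemma pvDfs_fold_eq (A : List (List Int)) (perm rem : List Nat) (best : List (List Int)) :
    (pvSplits rem).attach.foldl
        (fun b z => pvDfs A (perm ++ [z.1.2.1]) (z.1.1 ++ z.1.2.2) b) best
      = (pvSplits rem).foldl (fun b z => pvDfs A (perm ++ [z.2.1]) (z.1 ++ z.2.2) b) best :=
  List.foldl_attach (f := fun (b : List (List Int)) (z : List Nat × Nat × List Nat) => pvDfs A (perm ++ [z.2.1]) (z.1 ++ z.2.2) b)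

-- leaf case of the search
lemma pvDfs_leaf (A : List (List Int)) (perm : List Nat) (best : List (List Int)) :
    pvGood A perm [] best (pvDfs A perm [] best) := by
  rw [pvDfs]
  split_ifs with h
  · refine ⟨Or.inr ⟨[], List.Perm.refl [], by rw [List.append_nil]⟩, ?_, pvMatLt_asymm h⟩
    intro s hs
    have : s = [] := List.perm_nil.mp hs
    subst this
    rw [List.append_nil]
    exact pvMatLt_irrefl _
  · refine ⟨Or.inl rfl, ?_, pvMatLt_irrefl _⟩
    intro s hs
    have : s = [] := List.perm_nil.mp hs
    subst this
    rw [List.append_nil]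
    simpa using h


lemma pvDfs_good (A : List (List Int)) :
    ∀ (N : Nat) (rem : List Nat), rem.length ≤ N →
    ∀ (perm : List Nat) (best : List (List Int)) (q : List Nat),
      q.length = perm.length + rem.length → best = pvFull A q →
      pvGood A perm rem best (pvDfs A perm rem best) := by
  intro N
  induction N with
  | zero =>
    intro rem hrem perm best q hqlen hbest
    have : rem = [] := List.eq_nil_of_length_eq_zero (by omega)
    subst this
    exact pvDfs_leaf A perm best
  | succ N ih =>
    intro rem hrem perm best q hqlen hbest
    cases rem with
    | nil => exact pvDfs_leaf A perm best
    | cons y ys =>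
      -- common facts for the fold branch
      have hfold : pvGood A perm (y :: ys) best
          ((pvSplits (y :: ys)).foldl
            (fun b z => pvDfs A (perm ++ [z.2.1]) (z.1 ++ z.2.2) b) best) := by
        have hrec : ∀ z ∈ pvSplits (y :: ys), ∀ (b : List (List Int)) (q' : List Nat),
            q'.length = perm.length + (y :: ys).length → b = pvFull A q' →
            pvGood A (perm ++ [z.2.1]) (z.1 ++ z.2.2) b
              (pvDfs A (perm ++ [z.2.1]) (z.1 ++ z.2.2) b) := by
          intro z hz b q' hq'len hb
          have hlen := pvSplits_len hz
          refine ih (z.1 ++ z.2.2) ?_ (perm ++ [z.2.1]) b q' ?_ hb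
          · simp only [List.length_append, List.length_cons] at *
            omega
          · simp only [List.length_append, List.length_cons, List.length_nil] at *
            omega
        obtain ⟨hm, hmin, hb⟩ :=
          pvFold_good A perm (y :: ys) (pvSplits (y :: ys))
            (fun z hz => pvSplits_eq_orig _ z hz) hrec best q hqlen hbest
        refine ⟨?_, ?_, hb⟩
        · rcases hm with h | ⟨z, hz, s, hs, hse⟩
          · exact Or.inl h
          · refine Or.inr ⟨z.2.1 :: s, ?_, ?_⟩
            · refine (hs.cons z.2.1).trans ?_
              have := (List.perm_middle (a := z.2.1) (l₁ := z.1) (l₂ := z.2.2)).symm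
              rw [pvSplits_eq_orig _ z hz] at this
              exact this
            · rw [hse, ← List.append_cons]
        · intro s hs
          cases s with
          | nil => exact absurd hs.length_eq (by simp)
          | cons x s₂ =>
            have hx : x ∈ y :: ys := hs.subset (List.mem_cons_self ..)
            obtain ⟨z, hz, hzx⟩ := pvSplits_cover _ x hx
            subst hzx
            have hs₂ : s₂.Perm (z.1 ++ z.2.2) := by
              have h1 : (z.2.1 :: s₂).Perm (z.2.1 :: (z.1 ++ z.2.2)) := by
                refine hs.trans ?_
                conv_lhs => rw [← pvSplits_eq_orig _ z hz]
                exact List.perm_middle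
              exact h1.cons_inv
            have := hmin z hz s₂ hs₂
            rwa [← List.append_cons] at this
      cases hperm : perm with
      | nil =>
        subst hperm
        rw [pvDfs, pvDfs_fold_eq]
        exact hfold
      | cons p0 ptl =>
        subst hperm
        rw [pvDfs]
        split_ifs with hprune
        · -- pruned: every completion's first row already exceeds best's first row
          subst hbest
          refine ⟨Or.inl rfl, ?_, pvMatLt_irrefl _⟩
          intro s hs
          have hqpos : 0 < q.length := by
            simp only [List.length_cons] at hqlen; omega
          cases hq : q with
          | nil => rw [hq] at hqpos; simp at hqpos
          | cons q0 qtl =>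
            subst hq
            apply pvMatLt_asymm
            simp only [pvFull, List.map_cons, List.cons_append]
            rw [pvMatLt_cons_iff]
            left
            -- first rows: best's first row is lexicographically below every completion's
            have hlenrow : ((q0 :: qtl).map (fun j => pvRowGet A q0 j)).length
                = (p0 :: ptl).length + (y :: ys).length := by
              simpa using hqlen
            have hbest0 : (pvFull A (q0 :: qtl)).getD 0 []
                = (q0 :: qtl).map (fun j => pvRowGet A q0 j) := by simp [pvFull]
            rw [hbest0] at hprune
            have htk : (List.take (p0 :: ptl).length ((q0 :: qtl).map (fun j => pvRowGet A q0 j))).length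
                = ((p0 :: ptl).map (fun pj => pvRowGet A p0 pj)).length := by
              rw [List.length_take, hlenrow, List.length_map]
              simp only [List.length_cons]
              omega
            have happ := pvLexLt_append htk hprune
              (List.drop (p0 :: ptl).length ((q0 :: qtl).map (fun j => pvRowGet A q0 j)))
              (s.map (fun j => pvRowGet A p0 j))
            rw [List.take_append_drop] at happ
            have hcand : (p0 :: ptl).map (fun pj => pvRowGet A p0 pj) ++ s.map (fun j => pvRowGet A p0 j)
                = pvRowGet A p0 p0 :: (ptl ++ s).map (fun j => pvRowGet A p0 j) := by
              simp [List.map_append]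
            rw [hcand] at happ
            simpa using happ
        · rw [pvDfs_fold_eq]
          exact hfold


lemma pvMain (A : List (List Int)) : canonical_full A = canonical_full_alt A := by
  have hne : List.range A.length ∈ PySem.List.permutations (List.range A.length) A.length := by
    have h := pvMemPerms (List.range A.length) (List.range A.length) (List.Perm.refl _)
    rwa [List.length_range] at h
  have hmemperm : ∀ p, p ∈ PySem.List.permutations (List.range A.length) A.length →
      p.Perm (List.range A.length) ∧ pvAdjA A A.length p = pvFull A p := by
    intro p hp
    have hx : p ∈ PySem.List.permutations (List.range A.length) (List.range A.length).length := by
      simpa [List.length_range] using hp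
    have h1 := PySem.List.perm_of_mem_permutations hx
    have h2 : p.length = A.length := by simpa using h1.length_eq
    exact ⟨by simpa using h1, by rw [← h2]; exact pvAdjA_eq_pvFull A p⟩
  -- B side: the search result is the minimum over all permutations
  obtain ⟨hm, hmin, -⟩ := pvDfs_good A A.length (List.range A.length) (by simp) []
      (pvFull A (List.range A.length)) (List.range A.length) (by simp) rfl
  set rB := pvDfs A [] (List.range A.length) (pvFull A (List.range A.length)) with hrB
  have hBmem : ∃ s, s.Perm (List.range A.length) ∧ rB = pvFull A s := by
    rcases hm with h | ⟨s, hs, hse⟩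
    · exact ⟨List.range A.length, List.Perm.refl _, h⟩
    · exact ⟨s, hs, by simpa using hse⟩
  have hBmin : ∀ s, s.Perm (List.range A.length) → pvMatLt (pvFull A s) rB = false := by
    intro s hs
    have := hmin s hs
    simpa using this
  -- A side: the fold over the permutation list is the same minimum
  cases hL : PySem.List.permutations (List.range A.length) A.length with
  | nil => rw [hL] at hne; exact absurd hne (List.not_mem_nil)
  | cons l0 ls =>
    set rA := ls.foldl
        (fun m p => if pvMatLt (pvAdjA A A.length p) m then pvAdjA A A.length p else m)
        (pvAdjA A A.length l0) with hrA
    have hstep : canonical_full A = rA := by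
      show (List.foldl
          (fun min_adj perm =>
            let adj := pvAdjA A A.length perm
            match min_adj with
            | none => some adj
            | some m => if pvMatLt adj m then some adj else some m)
          none (PySem.List.permutations (List.range A.length) A.length)).getD [] = rA
      rw [hL]
      simp only [List.foldl_cons]
      rw [pvOptFold (pvAdjA A A.length) ls (pvAdjA A A.length l0)]
      rfl
    obtain ⟨hAm, hAmin, hAb⟩ := pvFoldMin (pvAdjA A A.length) ls (pvAdjA A A.length l0)
    have hAminAll : ∀ p ∈ l0 :: ls, pvMatLt (pvAdjA A A.length p) rA = false := by
      intro p hp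
      rw [hrA]
      rcases List.mem_cons.mp hp with rfl | hp
      · exact hAb
      · exact hAmin p hp
    have hAmem : ∃ p ∈ l0 :: ls, rA = pvFull A p := by
      rcases hAm with h | ⟨p, hp, hpe⟩
      · refine ⟨l0, List.mem_cons_self .., ?_⟩
        rw [hrA, h, (hmemperm l0 (by rw [hL]; exact List.mem_cons_self ..)).2]
      · refine ⟨p, List.mem_cons_of_mem _ hp, ?_⟩
        rw [hrA, hpe, (hmemperm p (by rw [hL]; exact List.mem_cons_of_mem _ hp)).2]
    obtain ⟨pA, hpA, hrAe⟩ := hAmem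
    have hpAperm := (hmemperm pA (by rw [hL]; exact hpA)).1
    obtain ⟨sB, hsB, hrBe⟩ := hBmem
    have h1 : pvMatLt rA rB = false := by
      rw [hrAe]; exact hBmin pA hpAperm
    have hsBmem : sB ∈ l0 :: ls := by
      have h := pvMemPerms sB (List.range A.length) hsB
      rw [List.length_range] at h
      rwa [hL] at h
    have h2 : pvMatLt rB rA = false := by
      rw [hrBe, ← (hmemperm sB (by rw [hL]; exact hsBmem)).2]
      exact hAminAll sB hsBmem
    rw [hstep, show canonical_full_alt A = rB from rfl]
    exact pvMatLt_eq_of_not h1 h2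

-- ===== VERDICT (by name: the statement is the Claim_ definition above) =====
theorem canonical_full_spec : Claim_equal_canonical_full := by
  intro A _ _
  exact pvMain A
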